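-- pv_equiv track=rewrite | github.com/SheffieldML/GPy | GPy/plotting/gpy_plot/plot_util.py | find_best_layout_for_subplots
-- ===== SOURCE A (Python) =====
-- def find_best_layout_for_subplots(num_subplots):
--     r, c = 1, 1
--     while (r*c) < num_subplots:
--         if (c==(r+1)) or (r==c):
--             c += 1
--         elif c==(r+2):
--             r += 1
--             c -= 1
--     return r, c
-- ===== SOURCE B (Python) =====
-- def find_best_layout_for_subplots(num_subplots):
--     if num_subplots <= 1:
--         return 1, 1
--     n = num_subplots
--     lo, hi = 1, n
--     while lo < hi:
--         mid = (lo + hi + 1) // 2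
--         if mid * mid <= n:
--             lo = mid
--         else:
--             hi = mid - 1
--     r = lo
--     c = max(r, -(-n // r))
--     return r, c
-- ===== Notes on version B (the rewrite author's own statement) =====
-- stated objective: alternative
-- what changed: Replaces A's step-by-step grid-growth loop (which walks every state (r,r)->(r,r+1)->(r,r+2)->(r+1,r+1)) by a closed form: r = isqrt(num_subplots) found by O(log n) binary search, c = max(r, ceil(n/r)).
import Mathlib
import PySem

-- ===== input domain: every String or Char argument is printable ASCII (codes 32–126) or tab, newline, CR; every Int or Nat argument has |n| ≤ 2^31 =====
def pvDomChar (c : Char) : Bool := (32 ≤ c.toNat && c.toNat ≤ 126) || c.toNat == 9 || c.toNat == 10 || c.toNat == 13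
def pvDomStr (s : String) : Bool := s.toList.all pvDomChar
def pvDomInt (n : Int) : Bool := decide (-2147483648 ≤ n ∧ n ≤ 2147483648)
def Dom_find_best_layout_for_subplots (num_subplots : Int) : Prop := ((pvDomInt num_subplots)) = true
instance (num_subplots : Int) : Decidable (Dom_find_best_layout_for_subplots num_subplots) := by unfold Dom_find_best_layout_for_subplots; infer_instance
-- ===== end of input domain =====

-- B replaces A's step-by-step grid-growth loop by a closed form: r = isqrt(n) found by
-- binary search, c = max(r, ceil(n/r)); objective: simpler/alternative structure.

-- ===== PORT A =====
-- A's while loop, state (r, c); the fuel argument is only a totality guard (proved sufficient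
-- below); when all branches are skipped Python loops forever, the port keeps recursing likewise.
def pvLoopA (n : Int) : Nat → Int → Int → Int × Int
  | 0, r, c => (r, c)
  | fuel+1, r, c =>
    if r * c < n then
      if c = r + 1 ∨ r = c then pvLoopA n fuel r (c + 1)
      else if c = r + 2 then pvLoopA n fuel (r + 1) (c - 1)
      else pvLoopA n fuel r c
    else (r, c)

def find_best_layout_for_subplots (num_subplots : Int) : Int × Int :=
  pvLoopA num_subplots (3 * num_subplots.toNat + 3) 1 1

-- ===== PORT B =====
-- binary-search integer square root, as in Source B; fuel is only a totality guard
def pvBS (n : Int) : Nat → Int → Int → Int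
  | 0, lo, _ => lo
  | fuel+1, lo, hi =>
    if lo < hi then
      let mid := PySem.Int.floordiv (lo + hi + 1) 2
      if mid * mid ≤ n then pvBS n fuel mid hi else pvBS n fuel lo (mid - 1)
    else lo

def find_best_layout_for_subplots_alt (num_subplots : Int) : Int × Int :=
  if num_subplots ≤ 1 then (1, 1)
  else
    let n := num_subplots
    let r := pvBS n n.toNat 1 n
    let c := max r (-(PySem.Int.floordiv (-n) r))
    (r, c)

-- ===== PRECONDITION & SPEC =====
def Spec_find_best_layout_for_subplots (num_subplots : Int) (out : Int × Int) : Prop := out = find_best_layout_for_subplots_alt num_subplots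
instance (num_subplots : Int) (out : Int × Int) : Decidable (Spec_find_best_layout_for_subplots num_subplots out) := by unfold Spec_find_best_layout_for_subplots; infer_instance

-- ===== CLAIM (what is proved, stated in full; the proofs are below) =====
def Claim_equal_find_best_layout_for_subplots : Prop := ∀ (num_subplots : Int), Dom_find_best_layout_for_subplots num_subplots → Spec_find_best_layout_for_subplots num_subplots (find_best_layout_for_subplots num_subplots)

-- ===== LEMMAS AND PROOFS =====

-- ceiling division: -((-n) // s) ≤ q ↔ n ≤ q*s  (0 < s)
theorem pv_ceil_le_iff (n s q : Int) (hs : 0 < s) :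
    (-(PySem.Int.floordiv (-n) s) ≤ q) ↔ n ≤ q * s := by
  rw [neg_le, PySem.Int.le_floordiv_iff_mul_le hs]
  constructor <;> intro h <;> nlinarith

-- the binary search maintains lo² ≤ n < (hi+1)² and returns the integer square root
theorem pvBS_correct (n : Int) :
    ∀ (fuel : Nat) (lo hi : Int), 1 ≤ lo → lo ≤ hi → lo * lo ≤ n → n < (hi + 1) * (hi + 1) →
    (hi - lo).toNat ≤ fuel →
    1 ≤ pvBS n fuel lo hi ∧ pvBS n fuel lo hi * pvBS n fuel lo hi ≤ n ∧
      n < (pvBS n fuel lo hi + 1) * (pvBS n fuel lo hi + 1) := by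
  intro fuel
  induction fuel with
  | zero =>
    intro lo hi h1 h2 h3 h4 hf
    have : lo = hi := by omega
    subst this
    simp [pvBS]
    exact ⟨h1, h3, h4⟩
  | succ f ih =>
    intro lo hi h1 h2 h3 h4 hf
    by_cases hlt : lo < hi
    · have hmid : lo + 1 ≤ PySem.Int.floordiv (lo + hi + 1) 2 ∧
          PySem.Int.floordiv (lo + hi + 1) 2 ≤ hi := by
        rw [PySem.Int.floordiv_eq_ediv_of_pos (by omega : (0:Int) < 2)]
        omega
      simp only [pvBS, hlt, if_true]
      set mid := PySem.Int.floordiv (lo + hi + 1) 2 with hm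
      by_cases hsq : mid * mid ≤ n
      · simp only [hsq, if_true]
        exact ih mid hi (by omega) (by omega) hsq h4 (by omega)
      · simp only [hsq, if_false]
        refine ih lo (mid - 1) h1 (by omega) h3 (by nlinarith) (by omega)
    · simp only [pvBS, hlt, if_false]
      have : lo = hi := by omega
      subst this
      exact ⟨h1, h3, h4⟩

-- A's loop, started on the diagonal (r, r) with r ≤ s = isqrt n, ends at (s, max s ⌈n/s⌉)
theorem pvLoopA_diag (n s : Int) (hs1 : 1 ≤ s) (hl : s * s ≤ n) (hu : n < (s + 1) * (s + 1)) :
    ∀ (k : Nat) (r : Int) (fuel : Nat), (s - r).toNat = k → 1 ≤ r → r ≤ s →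
    3 * k + 3 ≤ fuel →
    pvLoopA n fuel r r = (s, max s (-(PySem.Int.floordiv (-n) s))) := by
  intro k
  induction k with
  | zero =>
    intro r fuel hk hr1 hrs hfuel
    have hrs' : r = s := by omega
    subst hrs'
    obtain ⟨f, rfl⟩ : ∃ f, fuel = f + 1 + 1 + 1 := ⟨fuel - 3, by omega⟩
    by_cases h1 : r * r < n
    · by_cases h2 : r * (r + 1) < n
      · have h3 : ¬ r * (r + 2) < n := by nlinarith
        have hceil : -(PySem.Int.floordiv (-n) r) = r + 2 := by
          rw [PySem.Int.neg_floordiv_neg_eq_iff_of_pos (by omega : (0:Int) < r)]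
          constructor <;> nlinarith
        rw [hceil, max_eq_right (by omega : r ≤ r + 2)]
        have e2 : (r + 1 + 1 : Int) = r + 2 := by ring
        simp [pvLoopA, h1, h2, e2, h3]
      · have hceil : -(PySem.Int.floordiv (-n) r) = r + 1 := by
          rw [PySem.Int.neg_floordiv_neg_eq_iff_of_pos (by omega : (0:Int) < r)]
          constructor <;> nlinarith
        rw [hceil, max_eq_right (by omega : r ≤ r + 1)]
        simp [pvLoopA, h1, h2]
    · have hceil : -(PySem.Int.floordiv (-n) r) ≤ r := by
        rw [pv_ceil_le_iff n r r (by omega)]; omega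
      rw [max_eq_left hceil]
      simp [pvLoopA, h1]
  | succ k ih =>
    intro r fuel hk hr1 hrs hfuel
    have hrlt : r < s := by omega
    have hstep : (r + 1) * (r + 1) ≤ s * s := by nlinarith
    obtain ⟨f, rfl⟩ : ∃ f, fuel = f + 1 + 1 + 1 := ⟨fuel - 3, by omega⟩
    have h1 : r * r < n := by nlinarith
    have h2 : r * (r + 1) < n := by nlinarith
    have h3 : r * (r + 2) < n := by nlinarith
    have e2 : (r + 1 + 1 : Int) = r + 2 := by ring
    have g3a : ¬ (r + 2 = r + 1) := by omega
    have g3b : ¬ (r = r + 2) := by omega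
    have g5 : (r + 2 - 1 : Int) = r + 1 := by ring
    have hrec := ih (r + 1) f (by omega) (by omega) (by omega) (by omega)
    simp [pvLoopA, h1, h2, e2, h3, g3a, g3b, g5]
    simpa using hrec

-- ===== VERDICT (by name: the statement is the Claim_ definition above) =====
theorem find_best_layout_for_subplots_spec : Claim_equal_find_best_layout_for_subplots := by
  intro n _
  unfold Spec_find_best_layout_for_subplots find_best_layout_for_subplots
    find_best_layout_for_subplots_alt
  by_cases hn : n ≤ 1
  · have h1 : ¬ (1 * 1 : Int) < n := by omega
    simp only [hn, if_true]
    show pvLoopA n (3 * n.toNat + 2 + 1) 1 1 = (1, 1)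
    simp only [pvLoopA, h1, if_false]
  · simp only [hn, if_false]
    have hn2 : 2 ≤ n := by omega
    obtain ⟨hs1, hsl, hsu⟩ := pvBS_correct n n.toNat 1 n (by omega) (by omega) (by omega)
      (by nlinarith) (by omega)
    set s := pvBS n n.toNat 1 n with hsdef
    have hsn : s ≤ n := by nlinarith
    exact pvLoopA_diag n s hs1 hsl hsu (s - 1).toNat 1 (3 * n.toNat + 3) rfl (by omega)
      (by omega) (by omega)
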